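-- pv_equiv track=rewrite | github.com/vranda0108/Python-Lab | get_valid_invalid_text_count.py | get_valid_invalid_text_count
-- ===== SOURCE A (Python) =====
-- s={'{','(','[','<','>',']',')','}'}
--
-- pairs={'{':'}','<':'>','[':']','(':')'}
--
-- def validate_string(text):
--
-- 	stack=[]
-- 	for char in text:
-- 		if char in pairs:
-- 			stack.append(char)
-- 		elif char in pairs.values():
-- 			if not stack:
-- 				return False
-- 			top=stack.pop()
-- 			if pairs[top]!=char:
-- 				return False
-- 		elif char not in s:
-- 				return False
-- 	return not stack
--
-- def get_valid_invalid_text_count(texts):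
-- 	valid_count=0
-- 	invalid_count=0
--
-- 	for item in texts:
-- 		if isinstance(item,str):
-- 			if validate_string(item):
-- 				valid_count+=1
-- 			else:
-- 				invalid_count+=1
--
-- 	return (valid_count,invalid_count)
-- ===== SOURCE B (Python) =====
-- def _reduce_once(s):
--     # remove the first adjacent matched bracket pair, if any
--     for i in range(len(s) - 1):
--         if s[i] + s[i + 1] in ('()', '[]', '{}', '<>'):
--             return s[:i] + s[i + 2:]
--     return s
--
--
-- def validate_string(text):
--     s = text
--     while True:
--         t = _reduce_once(s)
--         if t == s:
--             return s == ''
--         s = t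
--
--
-- def get_valid_invalid_text_count(texts):
--     str_items = [item for item in texts if isinstance(item, str)]
--     valid_count = sum(1 for item in str_items if validate_string(item))
--     return (valid_count, len(str_items) - valid_count)
-- ===== Notes on version B (the rewrite author's own statement) =====
-- stated objective: alternative
-- what changed: validate_string is re-implemented as repeated reduction (delete the first adjacent matched pair '()','[]','{}','<>' until a fixpoint, valid iff the residue is empty) instead of A's explicit stack scan, and the tally is computed as a count of valid strings plus a subtraction instead of two running counters.
import Mathlib
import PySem

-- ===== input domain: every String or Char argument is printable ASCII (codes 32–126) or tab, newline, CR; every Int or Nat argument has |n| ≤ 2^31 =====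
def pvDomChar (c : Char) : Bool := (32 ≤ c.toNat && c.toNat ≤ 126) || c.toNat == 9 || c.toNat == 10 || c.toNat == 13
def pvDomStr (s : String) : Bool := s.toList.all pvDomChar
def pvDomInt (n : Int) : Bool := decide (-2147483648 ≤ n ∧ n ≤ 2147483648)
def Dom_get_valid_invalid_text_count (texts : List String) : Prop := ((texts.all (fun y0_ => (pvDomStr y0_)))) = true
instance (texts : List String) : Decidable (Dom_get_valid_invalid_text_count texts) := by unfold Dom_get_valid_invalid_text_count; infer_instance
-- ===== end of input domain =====

-- B replaces A's stack scan by repeated deletion of the first adjacent matched pair to a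
-- fixpoint (valid iff the residue is empty), and tallies valid via a count plus subtraction.

-- ===== PORT A =====
-- the module-level set s of the eight bracket characters
def pvSList : List Char := ['{', '(', '[', '<', '>', ']', ')', '}']

-- pairs[c] : the dict 'pairs' as a lookup (some = key present)
def pvCloseOf : Char → Option Char
  | '{' => some '}'
  | '<' => some '>'
  | '[' => some ']'
  | '(' => some ')'
  | _   => none

-- 'char in pairs.values()'
def pvIsClose (c : Char) : Bool := c = '}' || c = '>' || c = ']' || c = ')'

-- the loop of validate_string, with the stack as accumulator; early returns become 'false'.
-- 'pairs[top]' is ported as pvCloseOf top (top is always a key, so the none branch is unreachable).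
def pvValGoA : List Char → List Char → Bool
  | [], stack => stack.isEmpty
  | c :: cs, stack =>
    if (pvCloseOf c).isSome then pvValGoA cs (c :: stack)
    else if pvIsClose c then
      match stack with
      | [] => false
      | top :: rest => if pvCloseOf top = some c then pvValGoA cs rest else false
    else if pvSList.contains c then pvValGoA cs stack
    else false

def pvValidateA (text : String) : Bool := pvValGoA text.toList []

def pvCountGoA : List String → Int → Int → Int × Int
  | [], v, i => (v, i)
  | t :: rest, v, i =>
    if pvValidateA t then pvCountGoA rest (v + 1) i else pvCountGoA rest v (i + 1)

def get_valid_invalid_text_count (texts : List String) : Int × Int :=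
  pvCountGoA texts 0 0

-- ===== PORT B =====
-- 's[i]+s[i+1] in ('()','[]','{}','<>')'
def pvIsPair : Char → Char → Bool
  | '(', ')' => true
  | '[', ']' => true
  | '{', '}' => true
  | '<', '>' => true
  | _, _ => false

-- _reduce_once: remove the first adjacent matched pair, if any
def pvReduceOnce : List Char → List Char
  | a :: b :: rest => if pvIsPair a b then rest else a :: pvReduceOnce (b :: rest)
  | l => l

theorem pvReduceOnce_shrink (l : List Char) :
    pvReduceOnce l = l ∨ (pvReduceOnce l).length + 2 = l.length := by
  induction l with
  | nil => left; rfl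
  | cons a t ih =>
    cases t with
    | nil => left; rfl
    | cons b r =>
      by_cases h : pvIsPair a b = true
      · right; simp [pvReduceOnce, h]
      · rcases ih with h1 | h1
        · left; simp [pvReduceOnce, h, h1]
        · right; simpa [pvReduceOnce, h] using h1

-- the while-loop of B's validate_string
def pvReduceFix (l : List Char) : List Char :=
  let t := pvReduceOnce l
  if h : t = l then l else pvReduceFix t
termination_by l.length
decreasing_by
  rcases pvReduceOnce_shrink l with h1 | h1
  · exact absurd h1 h
  · omega

def pvValidateB (text : String) : Bool := pvReduceFix text.toList = []

def get_valid_invalid_text_count_alt (texts : List String) : Int × Int :=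
  let validCount : Int := (texts.countP (fun t => pvValidateB t) : Nat)
  (validCount, (texts.length : Int) - validCount)

-- ===== PRECONDITION & SPEC =====
def Spec_get_valid_invalid_text_count (texts : List String) (out : Int × Int) : Prop := out = get_valid_invalid_text_count_alt texts
instance (texts : List String) (out : Int × Int) : Decidable (Spec_get_valid_invalid_text_count texts out) := by unfold Spec_get_valid_invalid_text_count; infer_instance

-- ===== CLAIM (what is proved, stated in full; the proofs are below) =====
def Claim_equal_get_valid_invalid_text_count : Prop := ∀ (texts : List String), Dom_get_valid_invalid_text_count texts → Spec_get_valid_invalid_text_count texts (get_valid_invalid_text_count texts)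

-- ===== LEMMAS AND PROOFS =====

theorem pvIsPair_iff (a b : Char) : pvIsPair a b = true ↔ pvCloseOf a = some b := by
  constructor
  · intro h
    unfold pvIsPair at h
    split at h <;> simp_all [pvCloseOf]
  · intro h
    unfold pvCloseOf at h
    split at h
    all_goals first
      | (injection h with h2; subst h2; rfl)
      | simp at h

theorem pvClose_not_open (c : Char) (h : pvIsClose c = true) : pvCloseOf c = none := by
  simp [pvIsClose] at h
  rcases h with ((h | h) | h) | h <;> subst h <;> rfl

theorem pvS_open_or_close (c : Char) (h : pvSList.contains c = true) :
    (pvCloseOf c).isSome = true ∨ pvIsClose c = true := by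
  simp [pvSList] at h
  rcases h with h | h | h | h | h | h | h | h <;> subst h <;> simp [pvCloseOf, pvIsClose]

-- deleting an adjacent matched pair anywhere does not change A's verdict
theorem pvValGoA_removePair (o c : Char) (hp : pvIsPair o c = true) (u : List Char) :
    ∀ (v st : List Char), pvValGoA (u ++ o :: c :: v) st = pvValGoA (u ++ v) st := by
  have ho : pvCloseOf o = some c := (pvIsPair_iff o c).mp hp
  have hc : pvIsClose c = true := by
    unfold pvIsPair at hp; split at hp <;> simp_all [pvIsClose]
  have hcn : pvCloseOf c = none := pvClose_not_open c hc
  induction u with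
  | nil =>
    intro v st
    simp [pvValGoA, ho, hcn, hc]
  | cons x u' ih =>
    intro v st
    simp only [List.cons_append, pvValGoA]
    by_cases h1 : (pvCloseOf x).isSome = true
    · simp only [h1, if_true]; exact ih v (x :: st)
    · simp only [h1, if_false, Bool.false_eq_true]
      by_cases h2 : pvIsClose x = true
      · simp only [h2, if_true]
        cases st with
        | nil => rfl
        | cons top rest =>
          by_cases h3 : pvCloseOf top = some x
          · simp only [h3, if_true]; exact ih v rest
          · simp only [h3, if_false]
      · simp only [h2, if_false, Bool.false_eq_true]
        by_cases h4 : pvSList.contains x = true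
        · simp only [h4, if_true]; exact ih v st
        · simp only [h4, if_false, Bool.false_eq_true]

theorem pvReduceOnce_spec (l : List Char) :
    pvReduceOnce l = l ∨
      ∃ u o c v, pvIsPair o c = true ∧ l = u ++ o :: c :: v ∧ pvReduceOnce l = u ++ v := by
  induction l with
  | nil => left; rfl
  | cons a t ih =>
    cases t with
    | nil => left; rfl
    | cons b r =>
      by_cases h : pvIsPair a b = true
      · right; exact ⟨[], a, b, r, h, by simp, by simp [pvReduceOnce, h]⟩
      · rcases ih with h1 | ⟨u, o, c, v, hp, he, hr⟩
        · left; simp [pvReduceOnce, h, h1]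
        · right
          exact ⟨a :: u, o, c, v, hp, by simp [he], by simp [pvReduceOnce, h, hr]⟩

theorem pvValGoA_reduceOnce (l st : List Char) :
    pvValGoA (pvReduceOnce l) st = pvValGoA l st := by
  rcases pvReduceOnce_spec l with h | ⟨u, o, c, v, hp, he, hr⟩
  · rw [h]
  · rw [hr, he, pvValGoA_removePair o c hp u]

theorem pvValGoA_reduceFix (l : List Char) :
    ∀ st, pvValGoA (pvReduceFix l) st = pvValGoA l st := by
  induction l using pvReduceFix.induct with
  | case1 l t ht => intro st; rw [pvReduceFix, dif_pos ht]
  | case2 l t ht ih =>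
    intro st
    rw [pvReduceFix, dif_neg ht]
    rw [ih st, pvValGoA_reduceOnce]

theorem pvReduceFix_irred (l : List Char) :
    pvReduceOnce (pvReduceFix l) = pvReduceFix l := by
  induction l using pvReduceFix.induct with
  | case1 l t ht => rw [pvReduceFix, dif_pos ht]; exact ht
  | case2 l t ht ih => rw [pvReduceFix, dif_neg ht]; exact ih

theorem pvIrred_tail {a : Char} {t : List Char}
    (h : pvReduceOnce (a :: t) = a :: t) : pvReduceOnce t = t := by
  cases t with
  | nil => rfl
  | cons b r =>
    by_cases hp : pvIsPair a b = true
    · exfalso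
      have := congrArg List.length h
      simp [pvReduceOnce, hp] at this
      omega
    · simpa [pvReduceOnce, hp] using h

-- an irreducible string that A accepts from stack st consists only of closers
theorem pvIrred_valid_closers (t : List Char) (hirr : pvReduceOnce t = t) :
    ∀ st, pvValGoA t st = true → ∀ c ∈ t, pvIsClose c = true := by
  induction t with
  | nil => intro st _ c hc; simp at hc
  | cons a rest ih =>
    intro st hval c hc
    have hrest : pvReduceOnce rest = rest := pvIrred_tail hirr
    by_cases h1 : (pvCloseOf a).isSome = true
    · exfalso
      have hval' : pvValGoA rest (a :: st) = true := by
        simpa [pvValGoA, h1] using hval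
      cases rest with
      | nil => simp [pvValGoA] at hval'
      | cons b r =>
        have hbc : pvIsClose b = true := ih hrest (a :: st) hval' b (by simp)
        have hbn : pvCloseOf b = none := pvClose_not_open b hbc
        by_cases h3 : pvCloseOf a = some b
        · have hp : pvIsPair a b = true := (pvIsPair_iff a b).mpr h3
          have := congrArg List.length hirr
          simp [pvReduceOnce, hp] at this
          omega
        · simp [pvValGoA, hbn, hbc, h3] at hval'
    · by_cases h2 : pvIsClose a = true
      · rcases List.mem_cons.mp hc with hc | hc
        · exact hc ▸ h2
        · cases st with
          | nil => simp [pvValGoA, h1, h2] at hval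
          | cons top strest =>
            by_cases h3 : pvCloseOf top = some a
            · have hval' : pvValGoA rest strest = true := by
                simpa [pvValGoA, h1, h2, h3] using hval
              exact ih hrest strest hval' c hc
            · simp [pvValGoA, h1, h2, h3] at hval
      · exfalso
        by_cases h4 : pvSList.contains a = true
        · rcases pvS_open_or_close a h4 with h5 | h5
          · exact h1 h5
          · exact h2 h5
        · simp [pvValGoA, h1, h2] at hval
          exact h4 (by simpa using hval.1)

theorem pvIrred_valid_nil (t : List Char) (hirr : pvReduceOnce t = t)
    (hval : pvValGoA t [] = true) : t = [] := by
  cases t with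
  | nil => rfl
  | cons a rest =>
    exfalso
    have hc : pvIsClose a = true :=
      pvIrred_valid_closers (a :: rest) hirr [] hval a (by simp)
    have hn : pvCloseOf a = none := pvClose_not_open a hc
    simp [pvValGoA, hn, hc] at hval

theorem pvValidate_eq (text : String) : pvValidateA text = pvValidateB text := by
  unfold pvValidateA pvValidateB
  rw [← pvValGoA_reduceFix text.toList []]
  by_cases h : pvReduceFix text.toList = []
  · simp [h, pvValGoA]
  · simp only [h, decide_false]
    by_cases hv : pvValGoA (pvReduceFix text.toList) [] = true
    · exact absurd (pvIrred_valid_nil _ (pvReduceFix_irred text.toList) hv) h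
    · simpa using hv

theorem pvCountGoA_spec (texts : List String) :
    ∀ v i : Int, pvCountGoA texts v i =
      (v + (texts.countP (fun t => pvValidateB t) : Nat),
       i + ((texts.length : Int) - (texts.countP (fun t => pvValidateB t) : Nat))) := by
  induction texts with
  | nil => intro v i; simp [pvCountGoA]
  | cons t rest ih =>
    intro v i
    have hv := pvValidate_eq t
    by_cases h : pvValidateA t = true
    · have hb : pvValidateB t = true := hv ▸ h
      simp [pvCountGoA, h, hb, ih, Prod.ext_iff]
      omega
    · have hb : pvValidateB t = false := by rw [← hv]; simpa using h
      simp [pvCountGoA, h, hb, ih, Prod.ext_iff]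
      omega

-- ===== VERDICT (by name: the statement is the Claim_ definition above) =====
theorem get_valid_invalid_text_count_spec : Claim_equal_get_valid_invalid_text_count := by
  intro texts _
  unfold Spec_get_valid_invalid_text_count get_valid_invalid_text_count get_valid_invalid_text_count_alt
  rw [pvCountGoA_spec texts 0 0]
  simp
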